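-- pv_equiv track=rewrite | github.com/nonari/simpleDecipher | src/Text.py | _remove_grouped_spaces
-- ===== SOURCE A (Python) =====
-- def _remove_grouped_spaces(text):
--     was_space = False
--     filtered_text = ''
--     for char in text:
--         if ord(char) == 32:
--             if not was_space:
--                 filtered_text += ' '
--             was_space = True
--         else:
--             was_space = False
--             filtered_text += char
--     return filtered_text
-- ===== SOURCE B (Python) =====
-- def _remove_grouped_spaces(text):
--     out = []
--     i = 0
--     n = len(text)
--     while i < n:
--         c = text[i]
--         out.append(c)
--         i += 1
--         if c == ' ':
--             while i < n and text[i] == ' ':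
--                 i += 1
--     return ''.join(out)
-- ===== Notes on version B (the rewrite author's own statement) =====
-- stated objective: alternative
-- what changed: Replaces the boolean was_space flag with index-based run skipping: each space emits one output space and an inner loop jumps past the rest of the run; output is a list joined once instead of repeated string concatenation.
import Mathlib
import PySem

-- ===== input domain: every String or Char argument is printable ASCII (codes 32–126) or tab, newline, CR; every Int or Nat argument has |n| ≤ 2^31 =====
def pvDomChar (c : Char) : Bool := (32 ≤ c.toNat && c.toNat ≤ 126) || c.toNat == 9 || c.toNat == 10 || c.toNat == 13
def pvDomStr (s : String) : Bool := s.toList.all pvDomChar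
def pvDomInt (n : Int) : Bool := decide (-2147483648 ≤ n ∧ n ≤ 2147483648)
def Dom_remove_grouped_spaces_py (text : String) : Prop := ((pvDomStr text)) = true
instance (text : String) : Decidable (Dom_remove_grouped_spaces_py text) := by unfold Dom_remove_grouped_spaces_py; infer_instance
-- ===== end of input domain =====

-- B collapses space runs by index-based run skipping (emit the space, skip the rest of the run)
-- instead of A's was_space flag; same return value, objective: alternative decomposition.

-- ===== PORT A =====
-- A's for-loop with state (was_space, filtered_text), one step per character.
def pvALoop : List Char → Bool → List Char → List Char
  | [], _, acc => acc
  | c :: rest, ws, acc =>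
      if c = ' ' then
        pvALoop rest true (if ws then acc else acc ++ [' '])
      else
        pvALoop rest false (acc ++ [c])

def remove_grouped_spaces_py (text : String) : String :=
  String.ofList (pvALoop text.toList false [])

-- ===== PORT B =====
-- B's outer while: emit the character; after a space, skip the remaining run
-- (the inner `while text[i] == ' ': i += 1` is List.dropWhile on the rest).
def pvBLoop : List Char → List Char
  | [] => []
  | c :: rest =>
      if c = ' ' then ' ' :: pvBLoop (rest.dropWhile (· = ' '))
      else c :: pvBLoop rest
termination_by l => l.length
decreasing_by
  · simpa using Nat.lt_succ_of_le (List.length_dropWhile_le _ _)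
  · simp

def remove_grouped_spaces_py_alt (text : String) : String :=
  String.ofList (pvBLoop text.toList)

-- ===== PRECONDITION & SPEC =====
def Spec_remove_grouped_spaces_py (text : String) (out : String) : Prop := out = remove_grouped_spaces_py_alt text
instance (text : String) (out : String) : Decidable (Spec_remove_grouped_spaces_py text out) := by unfold Spec_remove_grouped_spaces_py; infer_instance

-- ===== CLAIM (what is proved, stated in full; the proofs are below) =====
def Claim_equal_remove_grouped_spaces_py : Prop := ∀ (text : String), Dom_remove_grouped_spaces_py text → Spec_remove_grouped_spaces_py text (remove_grouped_spaces_py text)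

-- ===== LEMMAS AND PROOFS =====

theorem pvALoop_eq (l : List Char) : ∀ (ws : Bool) (acc : List Char),
    pvALoop l ws acc = acc ++ pvBLoop (if ws then l.dropWhile (· = ' ') else l) := by
  induction l with
  | nil => intro ws acc; cases ws <;> simp [pvALoop, pvBLoop, List.dropWhile]
  | cons c rest ih =>
      intro ws acc
      by_cases hc : c = ' '
      · subst hc
        cases ws with
        | false =>
            simp only [pvALoop, Bool.false_eq_true, reduceIte]
            rw [ih true (acc ++ [' '])]
            simp [pvBLoop]
        | true =>
            simp only [pvALoop, reduceIte]
            rw [ih true acc]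
            simp [List.dropWhile]
      · have hd : List.dropWhile (fun x => decide (x = ' ')) (c :: rest) = c :: rest := by
          simp [List.dropWhile, hc]
        cases ws <;>
          simp only [pvALoop, if_neg hc, hd, reduceIte] <;>
          · rw [ih false (acc ++ [c])]
            simp [pvBLoop, hc]

-- ===== VERDICT (by name: the statement is the Claim_ definition above) =====
theorem remove_grouped_spaces_py_spec : Claim_equal_remove_grouped_spaces_py := by
  intro text _
  unfold Spec_remove_grouped_spaces_py remove_grouped_spaces_py remove_grouped_spaces_py_alt
  rw [pvALoop_eq]
  simp
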